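-- pv_equiv track=rewrite | github.com/tobiasspt/advent_of_code | 2024/Day15/day15.py | can_move_horizontal
-- ===== SOURCE A (Python) =====
-- def can_move_horizontal(pos: tuple[int,int], dx: int, dy: int, ware_house: list[list[str]]) -> bool:
--     x,y = pos
--     next_tile = ware_house[y][x+dx]
--     if next_tile == ".":
--         return True
--     elif next_tile == "#":
--         return False
--     elif next_tile in ["[", "]"]:
--         return can_move_horizontal((x+dx, y), dx, dy, ware_house)
-- ===== SOURCE B (Python) =====
-- def can_move_horizontal(pos: tuple[int, int], dx: int, dy: int, ware_house: list[list[str]]) -> bool: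
--     x, y = pos
--     row = ware_house[y]
--     while True:
--         x += dx
--         tile = row[x]
--         if tile == "[" or tile == "]":
--             continue
--         if tile == ".":
--             return True
--         if tile == "#":
--             return False
--         return None
-- ===== Notes on version B (the rewrite author's own statement) =====
-- stated objective: simpler
-- what changed: Replaced A's self-recursion (which re-indexes ware_house[y] on every call and rebuilds the position tuple) by a flat while-loop over a single local index on the row fetched once.
-- outside the precondition, e.g. on can_move_horizontal((0, 0), 1, 0, [['x', '@']]): A returns None, B returns None
import Mathlib
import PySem

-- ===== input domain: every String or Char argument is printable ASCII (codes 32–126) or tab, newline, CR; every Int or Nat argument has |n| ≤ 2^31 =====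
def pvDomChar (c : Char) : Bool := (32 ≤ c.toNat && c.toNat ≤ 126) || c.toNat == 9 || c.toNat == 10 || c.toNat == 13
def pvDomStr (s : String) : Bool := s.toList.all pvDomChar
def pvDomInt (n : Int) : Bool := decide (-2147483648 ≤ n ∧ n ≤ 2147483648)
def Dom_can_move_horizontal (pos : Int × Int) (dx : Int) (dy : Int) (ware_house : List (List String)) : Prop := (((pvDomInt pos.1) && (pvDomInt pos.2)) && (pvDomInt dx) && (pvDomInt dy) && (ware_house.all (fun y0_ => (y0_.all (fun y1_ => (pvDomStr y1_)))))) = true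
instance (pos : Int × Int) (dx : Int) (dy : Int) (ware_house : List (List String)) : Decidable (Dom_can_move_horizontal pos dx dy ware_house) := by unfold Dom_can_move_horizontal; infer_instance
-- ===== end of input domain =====

-- B rewrites A's self-recursion as a flat while-loop over one local index on the row fetched once (objective: simpler).
-- Both ports carry a fuel argument only to make the (possibly non-terminating) Python walk total; Pre_ guarantees the fuel suffices.

-- ===== PORT A =====
-- A's recursion: each call re-reads ware_house[y][x+dx]; out-of-range reads (an IndexError in Python) are outside Pre_.
def canA_go (dx : Int) (y : Int) (ware_house : List (List String)) (x : Int) : Nat → Bool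
  | 0 => false      -- fuel exhausted: unreachable under Pre_
  | fuel + 1 =>
    let next_tile := (PySem.List.pyGet? ((PySem.List.pyGet? ware_house y).getD []) (x + dx)).getD ""
    if next_tile = "." then true
    else if next_tile = "#" then false
    else if next_tile = "[" ∨ next_tile = "]" then canA_go dx y ware_house (x + dx) fuel
    else false      -- Python falls through and returns None here: outside Pre_

def can_move_horizontal (pos : Int × Int) (dx : Int) (dy : Int) (ware_house : List (List String)) : Bool :=
  canA_go dx pos.2 ware_house pos.1 (2 * ((PySem.List.pyGet? ware_house pos.2).getD []).length + 1)

-- ===== PORT B =====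
-- B's while-True loop: the row is fetched once; only the local index x changes.
def canB_loop (dx : Int) (row : List String) (x : Int) : Nat → Bool
  | 0 => false      -- fuel exhausted: unreachable under Pre_
  | fuel + 1 =>
    let tile := (PySem.List.pyGet? row (x + dx)).getD ""
    if tile = "[" ∨ tile = "]" then canB_loop dx row (x + dx) fuel
    else if tile = "." then true
    else if tile = "#" then false
    else false      -- Python returns None here: outside Pre_

def can_move_horizontal_alt (pos : Int × Int) (dx : Int) (dy : Int) (ware_house : List (List String)) : Bool :=
  let row := (PySem.List.pyGet? ware_house pos.2).getD []
  canB_loop dx row pos.1 (2 * row.length + 1)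

-- ===== PRECONDITION & SPEC =====
def tileAt (row : List String) (i : Int) : String := (PySem.List.pyGet? row i).getD ""

-- Pre_ excludes the inputs on which Python A does not return a bool: IndexError (row index or a walk step out of
-- range), RecursionError (dx = 0 starting on a box), and the implicit `return None` on a tile that is none of
-- '.', '#', '[' or ']' — i.e. it requires the pushed-box walk to reach '.' or '#' through box tiles only.
def Pre_can_move_horizontal (pos : Int × Int) (dx : Int) (dy : Int) (ware_house : List (List String)) : Prop :=
  ∃ k ∈ Finset.Icc 1 (2 * ((PySem.List.pyGet? ware_house pos.2).getD []).length + 1),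
    (∀ j ∈ Finset.Ico 1 k,
        tileAt ((PySem.List.pyGet? ware_house pos.2).getD []) (pos.1 + (j : Int) * dx) = "[" ∨
        tileAt ((PySem.List.pyGet? ware_house pos.2).getD []) (pos.1 + (j : Int) * dx) = "]") ∧
    (tileAt ((PySem.List.pyGet? ware_house pos.2).getD []) (pos.1 + (k : Int) * dx) = "." ∨
     tileAt ((PySem.List.pyGet? ware_house pos.2).getD []) (pos.1 + (k : Int) * dx) = "#")

instance (pos : Int × Int) (dx : Int) (dy : Int) (ware_house : List (List String)) : Decidable (Pre_can_move_horizontal pos dx dy ware_house) := by unfold Pre_can_move_horizontal; infer_instance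

def pvWitness_can_move_horizontal : (Int × Int) × Int × Int × List (List String) :=
  ((0, 0), 1, 0, [["@", "[", "]", "."]])

def Spec_can_move_horizontal (pos : Int × Int) (dx : Int) (dy : Int) (ware_house : List (List String)) (out : Bool) : Prop := out = can_move_horizontal_alt pos dx dy ware_house
instance (pos : Int × Int) (dx : Int) (dy : Int) (ware_house : List (List String)) (out : Bool) : Decidable (Spec_can_move_horizontal pos dx dy ware_house out) := by unfold Spec_can_move_horizontal; infer_instance

-- ===== CLAIM (what is proved, stated in full; the proofs are below) =====
def Claim_equal_can_move_horizontal : Prop := ∀ (pos : Int × Int) (dx : Int) (dy : Int) (ware_house : List (List String)), Dom_can_move_horizontal pos dx dy ware_house → Pre_can_move_horizontal pos dx dy ware_house → Spec_can_move_horizontal pos dx dy ware_house (can_move_horizontal pos dx dy ware_house)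

-- ===== LEMMAS AND PROOFS =====

-- Under a terminating walk (boxes up to step k, terminal at step k, k ≤ fuel), A's recursion returns
-- "tile at step k is '.'".
theorem canA_go_eq (dx : Int) (y : Int) (wh : List (List String)) :
    ∀ (fuel k : Nat) (x : Int), 1 ≤ k → k ≤ fuel →
    (∀ j ∈ Finset.Ico 1 k,
        tileAt ((PySem.List.pyGet? wh y).getD []) (x + (j : Int) * dx) = "[" ∨
        tileAt ((PySem.List.pyGet? wh y).getD []) (x + (j : Int) * dx) = "]") →
    (tileAt ((PySem.List.pyGet? wh y).getD []) (x + (k : Int) * dx) = "." ∨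
     tileAt ((PySem.List.pyGet? wh y).getD []) (x + (k : Int) * dx) = "#") →
    canA_go dx y wh x fuel =
      (tileAt ((PySem.List.pyGet? wh y).getD []) (x + (k : Int) * dx) == ".") := by
  intro fuel
  induction fuel with
  | zero => intro k x hk hkf _ _; omega
  | succ f ih =>
    intro k x hk hkf hbox hterm
    rcases Nat.eq_or_lt_of_le hk with h1 | h1
    · -- k = 1 : the next tile is already terminal
      subst h1
      rcases hterm with h | h <;>
        simp [canA_go, tileAt] at h ⊢ <;> simp [h]
    · -- k ≥ 2 : the next tile is a box, recurse with k-1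
      have hb := hbox 1 (by simp; omega)
      have hrec := ih (k - 1) (x + dx) (by omega) (by omega)
        (fun j hj => by
          have := hbox (j + 1) (by simp at hj ⊢; omega)
          have harith : x + dx + (j : Int) * dx = x + ((j : Nat) + 1 : Int) * dx := by ring
          simpa [harith, Nat.cast_add] using this)
        (by
          have harith : x + dx + ((k - 1 : Nat) : Int) * dx = x + (k : Int) * dx := by
            have : ((k - 1 : Nat) : Int) = (k : Int) - 1 := by omega
            rw [this]; ring
          simpa [harith] using hterm)
      have harith2 : x + dx + ((k - 1 : Nat) : Int) * dx = x + (k : Int) * dx := by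
        have : ((k - 1 : Nat) : Int) = (k : Int) - 1 := by omega
        rw [this]; ring
      rw [harith2] at hrec
      simp only [tileAt, Int.one_mul, Nat.cast_one] at hb
      rcases hb with h | h <;> simp [canA_go, h, hrec]

-- The same characterisation for B's loop.
theorem canB_loop_eq (dx : Int) (row : List String) :
    ∀ (fuel k : Nat) (x : Int), 1 ≤ k → k ≤ fuel →
    (∀ j ∈ Finset.Ico 1 k,
        tileAt row (x + (j : Int) * dx) = "[" ∨ tileAt row (x + (j : Int) * dx) = "]") →
    (tileAt row (x + (k : Int) * dx) = "." ∨ tileAt row (x + (k : Int) * dx) = "#") →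
    canB_loop dx row x fuel = (tileAt row (x + (k : Int) * dx) == ".") := by
  intro fuel
  induction fuel with
  | zero => intro k x hk hkf _ _; omega
  | succ f ih =>
    intro k x hk hkf hbox hterm
    rcases Nat.eq_or_lt_of_le hk with h1 | h1
    · subst h1
      rcases hterm with h | h <;>
        simp [canB_loop, tileAt] at h ⊢ <;> simp [h]
    · have hb := hbox 1 (by simp; omega)
      have hrec := ih (k - 1) (x + dx) (by omega) (by omega)
        (fun j hj => by
          have := hbox (j + 1) (by simp at hj ⊢; omega)
          have harith : x + dx + (j : Int) * dx = x + ((j : Nat) + 1 : Int) * dx := by ring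
          simpa [harith, Nat.cast_add] using this)
        (by
          have harith : x + dx + ((k - 1 : Nat) : Int) * dx = x + (k : Int) * dx := by
            have : ((k - 1 : Nat) : Int) = (k : Int) - 1 := by omega
            rw [this]; ring
          simpa [harith] using hterm)
      have harith2 : x + dx + ((k - 1 : Nat) : Int) * dx = x + (k : Int) * dx := by
        have : ((k - 1 : Nat) : Int) = (k : Int) - 1 := by omega
        rw [this]; ring
      rw [harith2] at hrec
      simp only [tileAt, Int.one_mul, Nat.cast_one] at hb
      rcases hb with h | h <;> simp [canB_loop, h, hrec]

-- ===== VERDICT (by name: the statement is the Claim_ definition above) =====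
theorem can_move_horizontal_spec : Claim_equal_can_move_horizontal := by
  intro pos dx dy wh _ hpre
  obtain ⟨k, hkmem, hbox, hterm⟩ := hpre
  simp only [Finset.mem_Icc] at hkmem
  unfold Spec_can_move_horizontal can_move_horizontal can_move_horizontal_alt
  rw [canA_go_eq dx pos.2 wh _ k pos.1 hkmem.1 hkmem.2 hbox hterm,
      canB_loop_eq dx ((PySem.List.pyGet? wh pos.2).getD []) _ k pos.1 hkmem.1 hkmem.2 hbox hterm]
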